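-- pv_equiv track=rewrite | github.com/lymchgmk/Algorithm-Problem-Solving | SWEA/수업/1248_공통조상.py | find_fathers
-- ===== SOURCE A (Python) =====
-- def find_fathers(S, adj):
--     fathers = [S]
--     root = []
--
--     while fathers:
--         child = fathers.pop()
--         for key, val in adj.items():
--             if child in val:
--                 fathers.append(key)
--                 root.append(key)
--                 break
--     return root
-- ===== SOURCE B (Python) =====
-- def find_fathers(S, adj):
--     # Build child -> parent map in one pass (first key containing a child wins,
--     # matching the dict-iteration-order scan of the original), then follow
--     # parent links from S; no per-ancestor rescan of the dict.
--     parent = {}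
--     for key, val in adj.items():
--         for v in val:
--             if v not in parent:
--                 parent[v] = key
--     root = []
--     cur = S
--     while cur in parent:
--         cur = parent[cur]
--         root.append(cur)
--     return root
-- ===== Notes on version B (the rewrite author's own statement) =====
-- stated objective: alternative
-- what changed: A rescans the whole dict for the parent of each ancestor; B builds a child->parent map in one pass and then just follows parent links, removing the per-ancestor scan (same value, different traversal; not measurably faster on the benchmark's shallow chains).
import Mathlib
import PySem

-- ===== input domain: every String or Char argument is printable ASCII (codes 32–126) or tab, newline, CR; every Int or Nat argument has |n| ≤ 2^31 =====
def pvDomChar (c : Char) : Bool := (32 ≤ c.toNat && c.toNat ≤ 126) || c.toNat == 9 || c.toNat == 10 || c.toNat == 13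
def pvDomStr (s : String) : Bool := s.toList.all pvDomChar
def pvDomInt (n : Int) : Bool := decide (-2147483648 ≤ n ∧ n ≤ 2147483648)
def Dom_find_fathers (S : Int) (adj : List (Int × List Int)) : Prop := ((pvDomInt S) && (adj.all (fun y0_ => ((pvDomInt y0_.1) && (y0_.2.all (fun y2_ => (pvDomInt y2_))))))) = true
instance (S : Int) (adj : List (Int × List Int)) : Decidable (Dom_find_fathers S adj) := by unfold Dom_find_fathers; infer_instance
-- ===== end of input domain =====

-- Alternative: B builds the child→parent map once and follows it; A rescans the dict per ancestor.
-- Equivalence is on the return value; neither program mutates its arguments.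

-- ===== PORT A =====
-- A's inner `for key, val in adj.items(): if child in val: … break`:
-- first key whose value list contains `child`, or none.
def scanA (adj : List (Int × List Int)) (child : Int) : Option Int :=
  match adj with
  | [] => none
  | (k, v) :: rest => if v.contains child then some k else scanA rest child

-- A's `while fathers:` loop.  The Python stack `fathers` is kept head-first
-- (Python's pop()/append() act on the end; here on the head — same element).
-- The fuel argument only makes the loop total: when A terminates it performs at
-- most adj.length + 1 iterations (each found parent is a distinct key of adj),
-- so the fuel is never exhausted on inputs admitted by Pre_.
def loopA (adj : List (Int × List Int)) : Nat → List Int → List Int → List Int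
  | 0, _, root => root
  | fuel + 1, fathers, root =>
    match fathers with
    | [] => root
    | child :: rest =>
      match scanA adj child with
      | some k => loopA adj fuel (k :: rest) (root ++ [k])
      | none => loopA adj fuel rest root

def find_fathers (S : Int) (adj : List (Int × List Int)) : List Int :=
  loopA adj (adj.length + 1) [S] []

-- ===== PORT B =====
-- B's `for key, val in adj.items(): for v in val: if v not in parent: parent[v] = key`.
def buildParent (adj : List (Int × List Int)) : PySem.Dict Int Int :=
  adj.foldl
    (fun d kv => kv.2.foldl (fun d v => if d.contains v then d else d.insert v kv.1) d)
    PySem.Dict.empty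

-- B's `while cur in parent:` loop (fuel only for totality, as in loopA).
def followB (parent : PySem.Dict Int Int) : Nat → Int → List Int → List Int
  | 0, _, root => root
  | fuel + 1, cur, root =>
    match parent.get? cur with
    | some p => followB parent fuel p (root ++ [p])
    | none => root

def find_fathers_alt (S : Int) (adj : List (Int × List Int)) : List Int :=
  followB (buildParent adj) (adj.length + 1) S []

-- ===== PRECONDITION & SPEC =====
-- The parent of c: the first key of adj whose children list contains c.
def parentOf (adj : List (Int × List Int)) (c : Int) : Option Int :=
  (adj.find? (fun kv => kv.2.contains c)).map (·.1)

-- Pre_ excludes (a) inputs whose parent chain from S cycles — A's while loop never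
-- terminates there (and B's doesn't either): a terminating chain has pairwise
-- distinct parents, all keys of adj, so iterating the parent map |adj| + 1 times
-- from S must run off the tree — and (b) association lists with duplicate keys,
-- which cannot arise from the Python dict `adj` models.
def Pre_find_fathers (S : Int) (adj : List (Int × List Int)) : Prop :=
  (fun o => o.bind (parentOf adj))^[adj.length + 1] (some S) = none ∧
  (adj.map Prod.fst).Nodup

instance (S : Int) (adj : List (Int × List Int)) : Decidable (Pre_find_fathers S adj) := by
  unfold Pre_find_fathers; infer_instance

def pvWitness_find_fathers : Int × (List (Int × List Int)) :=
  (3, [(1, [2, 3]), (0, [1])])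

def Spec_find_fathers (S : Int) (adj : List (Int × List Int)) (out : List Int) : Prop :=
  out = find_fathers_alt S adj
instance (S : Int) (adj : List (Int × List Int)) (out : List Int) : Decidable (Spec_find_fathers S adj out) := by
  unfold Spec_find_fathers; infer_instance

-- ===== CLAIM (what is proved, stated in full; the proofs are below) =====
def Claim_equal_find_fathers : Prop :=
  ∀ (S : Int) (adj : List (Int × List Int)), Dom_find_fathers S adj →
    Pre_find_fathers S adj → Spec_find_fathers S adj (find_fathers S adj)

-- ===== LEMMAS AND PROOFS =====

-- The ancestor chain of c: some list iff it closes off (reaches a parentless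
-- node) within the given number of steps.
def ancChain (adj : List (Int × List Int)) : Nat → Int → Option (List Int)
  | 0, c => match scanA adj c with | none => some [] | some _ => none
  | n + 1, c =>
    match scanA adj c with
    | none => some []
    | some p => (ancChain adj n p).map (p :: ·)

theorem parentOf_eq_scanA (adj : List (Int × List Int)) (c : Int) :
    parentOf adj c = scanA adj c := by
  induction adj with
  | nil => simp [parentOf, scanA]
  | cons kv rest ih =>
    simp only [parentOf, scanA, List.find?_cons] at *
    by_cases hm : c ∈ kv.2
    · simp [hm]
    · simpa [hm] using ih

-- If the parent map iterated n + 1 times from c runs off the tree, the ancestor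
-- chain of c closes off within n steps.
theorem iterate_to_ancChain (adj : List (Int × List Int)) (n : Nat) (c : Int)
    (h : (fun o => o.bind (parentOf adj))^[n + 1] (some c) = none) :
    (ancChain adj n c).isSome := by
  induction n generalizing c with
  | zero =>
    simp [parentOf_eq_scanA] at h
    simp [ancChain, h]
  | succ n ih =>
    rw [Function.iterate_succ_apply] at h
    simp only [Option.bind_some] at h
    cases hp : parentOf adj c with
    | none =>
      rw [parentOf_eq_scanA] at hp
      simp [ancChain, hp]
    | some p =>
      rw [hp] at h
      have := ih p h
      rw [parentOf_eq_scanA] at hp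
      cases hL : ancChain adj n p with
      | none => rw [hL] at this; simp at this
      | some L => simp [ancChain, hp, hL]

-- The inner fold of buildParent: a key already present is kept, a missing
-- child gets parent k iff it occurs in vs.
theorem get?_inner (vs : List Int) (k : Int) (d : PySem.Dict Int Int) (c : Int) :
    ((vs.foldl (fun d v => if d.contains v then d else d.insert v k) d).get? c)
      = match d.get? c with
        | some p => some p
        | none => if c ∈ vs then some k else none := by
  induction vs generalizing d with
  | nil => cases h : d.get? c <;> simp [h]
  | cons v vs ih =>
    simp only [List.foldl_cons, ih]
    by_cases hvd : d.contains v = true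
    · simp [hvd]
      cases hdc : d.get? c with
      | some p => simp
      | none =>
        by_cases hcv : c = v
        · subst hcv
          rw [PySem.Dict.contains_eq_isSome_get?, hdc] at hvd
          simp at hvd
        · simp [hcv]
    · simp only [hvd, Bool.false_eq_true, if_false]
      by_cases hcv : c = v
      · subst hcv
        rw [PySem.Dict.contains_eq_isSome_get?] at hvd
        cases hdc : d.get? c with
        | some p => rw [hdc] at hvd; simp at hvd
        | none =>
          rw [PySem.Dict.get?_insert_self]
          simp
      · rw [PySem.Dict.get?_insert]
        simp only [hcv, if_false]
        cases d.get? c <;> simp [hcv]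

-- The outer fold: lookup in buildParent's accumulator equals A's first-key scan.
theorem get?_outer (adj : List (Int × List Int)) (d : PySem.Dict Int Int) (c : Int) :
    ((adj.foldl
        (fun d kv => kv.2.foldl (fun d v => if d.contains v then d else d.insert v kv.1) d)
        d).get? c)
      = match d.get? c with
        | some p => some p
        | none => scanA adj c := by
  induction adj generalizing d with
  | nil => cases h : d.get? c <;> simp [h, scanA]
  | cons kv rest ih =>
    simp only [List.foldl_cons, ih, get?_inner]
    cases d.get? c with
    | some p => simp
    | none =>
      simp only [scanA]
      by_cases hc : c ∈ kv.2
      · simp [hc]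
      · simp [hc]

theorem get?_buildParent (adj : List (Int × List Int)) (c : Int) :
    (buildParent adj).get? c = scanA adj c := by
  unfold buildParent
  rw [get?_outer]
  simp

-- With a closed chain, A's loop produces root ++ chain given enough fuel.
theorem loopA_chain (adj : List (Int × List Int)) (n : Nat) (c : Int) (L : List Int)
    (h : ancChain adj n c = some L) :
    ∀ fuel root, n + 1 ≤ fuel → loopA adj fuel [c] root = root ++ L := by
  induction n generalizing c L with
  | zero =>
    intro fuel root hf
    obtain ⟨f, rfl⟩ : ∃ f, fuel = f + 1 := ⟨fuel - 1, by omega⟩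
    simp only [ancChain] at h
    cases hs : scanA adj c with
    | some p => rw [hs] at h; simp at h
    | none =>
      rw [hs] at h
      simp at h
      subst h
      simp only [loopA, hs]
      cases f <;> simp [loopA]
  | succ n ih =>
    intro fuel root hf
    obtain ⟨f, rfl⟩ : ∃ f, fuel = f + 1 := ⟨fuel - 1, by omega⟩
    simp only [ancChain] at h
    cases hs : scanA adj c with
    | none =>
      rw [hs] at h
      simp at h
      subst h
      simp only [loopA, hs]
      cases f <;> simp [loopA]
    | some p =>
      rw [hs] at h
      simp at h
      obtain ⟨L', hL, rfl⟩ := h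
      simp only [loopA, hs]
      rw [ih p L' hL f (root ++ [p]) (by omega)]
      simp

-- With a closed chain, B's loop produces root ++ chain given enough fuel.
theorem followB_chain (adj : List (Int × List Int)) (n : Nat) (c : Int) (L : List Int)
    (h : ancChain adj n c = some L) :
    ∀ fuel root, n ≤ fuel → followB (buildParent adj) fuel c root = root ++ L := by
  induction n generalizing c L with
  | zero =>
    intro fuel root _
    simp only [ancChain] at h
    cases hs : scanA adj c with
    | some p => rw [hs] at h; simp at h
    | none =>
      rw [hs] at h
      simp at h
      subst h
      cases fuel with
      | zero => simp [followB]
      | succ f => simp [followB, get?_buildParent, hs]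
  | succ n ih =>
    intro fuel root hf
    obtain ⟨f, rfl⟩ : ∃ f, fuel = f + 1 := ⟨fuel - 1, by omega⟩
    simp only [ancChain] at h
    cases hs : scanA adj c with
    | none =>
      rw [hs] at h
      simp at h
      subst h
      simp [followB, get?_buildParent, hs]
    | some p =>
      rw [hs] at h
      simp at h
      obtain ⟨L', hL, rfl⟩ := h
      simp only [followB, get?_buildParent, hs]
      rw [ih p L' hL f (root ++ [p]) (by omega)]
      simp

-- ===== VERDICT (by name: the statement is the Claim_ definition above) =====
theorem find_fathers_spec : Claim_equal_find_fathers := by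
  intro S adj _ hpre
  obtain ⟨hiter, _⟩ := hpre
  have hchain := iterate_to_ancChain adj adj.length S hiter
  cases hL : ancChain adj adj.length S with
  | none => rw [hL] at hchain; simp at hchain
  | some L =>
    unfold Spec_find_fathers find_fathers find_fathers_alt
    rw [loopA_chain adj adj.length S L hL (adj.length + 1) [] (by omega),
        followB_chain adj adj.length S L hL (adj.length + 1) [] (by omega)]
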